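-- pv_equiv track=rewrite | github.com/yeggyseo/algorithm | week_5/getCorrectParenthesis.py | changeToCorrectParenthesis
-- ===== SOURCE A (Python) =====
-- from collections import deque
--
-- def isCorrectParenthesis(string):
--     stack = []
--     for s in string:
--         if s == "(":
--             stack.append(s)
--         elif stack:
--             stack.pop()
--     return len(stack) == 0
--
-- def separateToUV(string):
--     queue = deque(string)
--     u, v = "", ""
--     left, right = 0, 0
--     while queue:
--         char = queue.popleft()
--         u += char
--         if char == "(":
--             left += 1
--         else:
--             right += 1
--         if left == right:
--             break
--
--     v = "".join(list(queue))
--     return u, v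
--
-- def reverseParenthesis(string):
--     reversedString = ""
--     for char in string:
--         if char == "(":
--             reversedString += ")"
--         else:
--             reversedString += "("
--     return reversedString
--
-- def changeToCorrectParenthesis(string):
--     if string == "":
--         return ""
--
--     u, v = separateToUV(string)
--
--     if isCorrectParenthesis(u):
--         return u + changeToCorrectParenthesis(v)
--     else:
--         return "(" + changeToCorrectParenthesis(v) + ")" + reverseParenthesis(u[1:-1])
-- ===== SOURCE B (Python) =====
-- def changeToCorrectParenthesis(string):
--     # Single pass: split at zero-balance points while tracking a clamped
--     # stack-size counter; assemble the output from two buffers.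
--     pre = []
--     post = []
--     cur = []
--     bal = 0
--     clamp = 0
--     for ch in string:
--         cur.append(ch)
--         if ch == "(":
--             bal += 1
--             clamp += 1
--         else:
--             bal -= 1
--             if clamp:
--                 clamp -= 1
--         if bal == 0:
--             if clamp == 0:
--                 pre.append("".join(cur))
--             else:
--                 pre.append("(")
--                 post.append(")" + "".join(")" if c == "(" else "(" for c in cur[1:-1]))
--             cur = []
--             clamp = 0
--     if cur:
--         if clamp == 0:
--             pre.append("".join(cur))
--         else:
--             pre.append("(")
--             post.append(")" + "".join(")" if c == "(" else "(" for c in cur[1:-1]))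
--     return "".join(pre) + "".join(reversed(post))
-- ===== Notes on version B (the rewrite author's own statement) =====
-- stated objective: faster
-- what changed: Replaced A's recursion with three helper passes (stack simulation, deque splitting, repeated string concatenation of whole suffixes) by a single left-to-right pass that tracks a balance counter and a clamped stack-size counter, splits at zero-balance points, and assembles the result from two buffers joined once at the end.
import Mathlib
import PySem

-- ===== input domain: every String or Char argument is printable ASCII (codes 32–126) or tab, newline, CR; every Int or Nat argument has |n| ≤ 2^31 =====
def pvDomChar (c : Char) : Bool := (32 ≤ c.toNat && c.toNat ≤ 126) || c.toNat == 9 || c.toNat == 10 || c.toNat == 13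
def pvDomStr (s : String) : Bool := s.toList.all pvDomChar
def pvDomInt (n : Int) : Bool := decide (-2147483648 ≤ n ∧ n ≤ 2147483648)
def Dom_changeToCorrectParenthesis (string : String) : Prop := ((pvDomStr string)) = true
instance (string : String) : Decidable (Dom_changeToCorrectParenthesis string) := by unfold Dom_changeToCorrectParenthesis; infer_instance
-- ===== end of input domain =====

-- B replaces A's recursion with helper passes (stack, deque splitting, repeated
-- substring concatenation) by one index pass with two integer counters and two
-- output buffers; objective: faster (one pass, no quadratic concatenation).

-- ===== PORT A =====
-- isCorrectParenthesis: stack simulation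
def pvStackStep (stack : List Char) (c : Char) : List Char :=
  if c = '(' then stack ++ [c] else if stack ≠ [] then stack.dropLast else stack

def isCorrectParenthesis (s : List Char) : Bool :=
  (s.foldl pvStackStep []).length == 0

-- separateToUV's while loop over the deque (u accumulates, break when left == right)
def sepLoop : List Char → List Char → Int → Int → List Char × List Char
  | [], u, _, _ => (u, [])
  | c :: q, u, l, r =>
    let u' := u ++ [c]
    let l' := if c = '(' then l + 1 else l
    let r' := if c = '(' then r else r + 1
    if l' = r' then (u', q) else sepLoop q u' l' r'

def reverseParenthesis (s : List Char) : List Char :=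
  s.foldl (fun acc c => acc ++ [if c = '(' then ')' else '(']) []

-- one-step unfolding of the while loop (also used by goA's termination proof)
lemma sepLoop_cons (c : Char) (q u : List Char) (l r : Int) :
    sepLoop (c :: q) u l r =
      if (if c = '(' then l + 1 else l) = (if c = '(' then r else r + 1) then (u ++ [c], q)
      else sepLoop q (u ++ [c]) (if c = '(' then l + 1 else l) (if c = '(' then r else r + 1) := by
  simp only [sepLoop]

-- used by goA's termination proof
lemma sepLoop_snd_len : ∀ (q : List Char) (c : Char) (u : List Char) (l r : Int),
    (sepLoop (c :: q) u l r).2.length ≤ q.length := by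
  intro q
  induction q with
  | nil =>
    intro c u l r
    rw [sepLoop_cons]
    by_cases hlr : (if c = '(' then l + 1 else l) = (if c = '(' then r else r + 1)
    · rw [if_pos hlr]
    · rw [if_neg hlr]; simp [sepLoop]
  | cons d q' ih =>
    intro c u l r
    rw [sepLoop_cons]
    by_cases hlr : (if c = '(' then l + 1 else l) = (if c = '(' then r else r + 1)
    · rw [if_pos hlr]
    · rw [if_neg hlr]; exact le_trans (ih d _ _ _) (Nat.le_succ _)

def goA : List Char → List Char
  | [] => []
  | c :: rest =>
    let p := sepLoop (c :: rest) [] 0 0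
    if isCorrectParenthesis p.1 then p.1 ++ goA p.2
    else '(' :: (goA p.2 ++ ')' :: reverseParenthesis (PySem.List.slice p.1 (some 1) (some (-1))))
  termination_by s => s.length
  decreasing_by
    all_goals exact Nat.lt_succ_of_le (sepLoop_snd_len rest c [] 0 0)

def changeToCorrectParenthesis (string : String) : String :=
  String.mk (goA string.toList)

-- ===== PORT B =====
def pvFlip (c : Char) : Char := if c = '(' then ')' else '('

structure PVStB where
  pre : List (List Char)
  post : List (List Char)
  cur : List Char
  bal : Int
  clamp : Int

def stepB (st : PVStB) (ch : Char) : PVStB :=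
  let cur := st.cur ++ [ch]
  let bal := if ch = '(' then st.bal + 1 else st.bal - 1
  let clamp := if ch = '(' then st.clamp + 1 else if st.clamp ≠ 0 then st.clamp - 1 else st.clamp
  if bal = 0 then
    if clamp = 0 then ⟨st.pre ++ [cur], st.post, [], 0, 0⟩
    else ⟨st.pre ++ [['(']], st.post ++ [')' :: (PySem.List.slice cur (some 1) (some (-1))).map pvFlip], [], 0, 0⟩
  else ⟨st.pre, st.post, cur, bal, clamp⟩

def changeToCorrectParenthesis_alt (string : String) : String :=
  let st := string.toList.foldl stepB ⟨[], [], [], 0, 0⟩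
  let st2 :=
    if st.cur = [] then st
    else if st.clamp = 0 then ⟨st.pre ++ [st.cur], st.post, [], 0, 0⟩
    else ⟨st.pre ++ [['(']], st.post ++ [')' :: (PySem.List.slice st.cur (some 1) (some (-1))).map pvFlip], [], 0, 0⟩
  String.mk (st2.pre.flatten ++ st2.post.reverse.flatten)

-- ===== PRECONDITION & SPEC =====
def Spec_changeToCorrectParenthesis (string : String) (out : String) : Prop := out = changeToCorrectParenthesis_alt string
instance (string : String) (out : String) : Decidable (Spec_changeToCorrectParenthesis string out) := by unfold Spec_changeToCorrectParenthesis; infer_instance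

-- ===== CLAIM (what is proved, stated in full; the proofs are below) =====
def Claim_equal_changeToCorrectParenthesis : Prop := ∀ (string : String), Dom_changeToCorrectParenthesis string → Spec_changeToCorrectParenthesis string (changeToCorrectParenthesis string)

-- ===== LEMMAS AND PROOFS =====

-- pure characterisations of B's running counters
def balL (u : List Char) : Int := u.foldl (fun b c => if c = '(' then b + 1 else b - 1) 0
def clampL (u : List Char) : Int :=
  u.foldl (fun n c => if c = '(' then n + 1 else if n ≠ 0 then n - 1 else n) 0

lemma balL_snoc (u : List Char) (c : Char) :
    balL (u ++ [c]) = if c = '(' then balL u + 1 else balL u - 1 := by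
  simp [balL, List.foldl_append]

lemma clampL_snoc (u : List Char) (c : Char) :
    clampL (u ++ [c]) = if c = '(' then clampL u + 1 else if clampL u ≠ 0 then clampL u - 1 else clampL u := by
  simp [clampL, List.foldl_append]

-- A's stack length is B's clamped counter
lemma stack_clamp : ∀ (u : List Char) (st : List Char),
    ((List.foldl pvStackStep st u).length : Int)
      = List.foldl (fun n c => if c = '(' then n + 1 else if n ≠ 0 then n - 1 else n)
          ((st.length : Int)) u := by
  intro u
  induction u with
  | nil => intro st; rfl
  | cons c u ih =>
    intro st
    simp only [List.foldl_cons]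
    rw [ih]
    congr 1
    by_cases hc : c = '('
    · simp [pvStackStep, hc]
    · by_cases hst : st = []
      · simp [pvStackStep, hc, hst]
      · have h1 : 1 ≤ st.length := by
          cases st with
          | nil => exact absurd rfl hst
          | cons a t => simp
        have hne : (st.length : Int) ≠ 0 := by
          have : st.length ≠ 0 := by omega
          exact_mod_cast this
        simp only [pvStackStep, if_neg hc, if_pos hst, List.length_dropLast, if_pos hne]
        omega

lemma isCorrect_iff (u : List Char) : isCorrectParenthesis u = true ↔ clampL u = 0 := by
  have h := stack_clamp u []
  simp only [List.length_nil, Nat.cast_zero] at h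
  simp only [isCorrectParenthesis, beq_iff_eq, clampL]
  rw [← h]
  omega

lemma revP_eq_map (u : List Char) : reverseParenthesis u = u.map pvFlip := by
  simpa [reverseParenthesis, pvFlip] using
    PySem.List.foldl_append_singleton_eq_map (fun c => if c = '(' then ')' else '(') u []

-- B's tail emission + final join, as a function of the final state
def assemble (st : PVStB) : List Char :=
  let st2 :=
    if st.cur = [] then st
    else if st.clamp = 0 then ⟨st.pre ++ [st.cur], st.post, [], 0, 0⟩
    else ⟨st.pre ++ [['(']], st.post ++ [')' :: (PySem.List.slice st.cur (some 1) (some (-1))).map pvFlip], [], 0, 0⟩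
  st2.pre.flatten ++ st2.post.reverse.flatten

lemma alt_eq_assemble (s : String) :
    changeToCorrectParenthesis_alt s
      = String.mk (assemble (s.toList.foldl stepB ⟨[], [], [], 0, 0⟩)) := rfl

-- A's recursion restarted mid-segment
def G (s cur : List Char) (l r : Int) : List Char :=
  let p := sepLoop s cur l r
  if isCorrectParenthesis p.1 then p.1 ++ goA p.2
  else '(' :: (goA p.2 ++ ')' :: reverseParenthesis (PySem.List.slice p.1 (some 1) (some (-1))))

lemma goA_eq_G (s : List Char) : goA s = G s [] 0 0 := by
  cases s with
  | nil => simp [goA, G, sepLoop, isCorrectParenthesis]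
  | cons c rest => rw [goA]; rfl

lemma stepB_eq (pre post : List (List Char)) (cur : List Char) (c : Char) :
    stepB ⟨pre, post, cur, balL cur, clampL cur⟩ c =
      if balL (cur ++ [c]) = 0 then
        (if clampL (cur ++ [c]) = 0 then ⟨pre ++ [cur ++ [c]], post, [], 0, 0⟩
         else ⟨pre ++ [['(']], post ++ [')' :: (PySem.List.slice (cur ++ [c]) (some 1) (some (-1))).map pvFlip], [], 0, 0⟩)
      else ⟨pre, post, cur ++ [c], balL (cur ++ [c]), clampL (cur ++ [c])⟩ := by
  simp only [stepB, balL_snoc, clampL_snoc]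

lemma aux_nil (cur : List Char) (l r : Int) (pre post : List (List Char)) :
    assemble ⟨pre, post, cur, balL cur, clampL cur⟩
      = pre.flatten ++ G [] cur l r ++ post.reverse.flatten := by
  simp only [G, sepLoop]
  by_cases hcur : cur = []
  · subst hcur
    have : isCorrectParenthesis ([] : List Char) = true := by decide
    simp [assemble, this, goA]
  · by_cases hcl : clampL cur = 0
    · have hic : isCorrectParenthesis cur = true := (isCorrect_iff cur).mpr hcl
      simp [assemble, hcur, hcl, hic, goA]
    · have hic : isCorrectParenthesis cur ≠ true := by
        intro hh; exact hcl ((isCorrect_iff cur).mp hh)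
      simp [assemble, hcur, hcl, hic, goA, revP_eq_map]

lemma aux : ∀ (n : Nat) (s : List Char), s.length ≤ n →
    ∀ (cur : List Char) (l r : Int) (pre post : List (List Char)), l - r = balL cur →
    assemble (s.foldl stepB ⟨pre, post, cur, balL cur, clampL cur⟩)
      = pre.flatten ++ G s cur l r ++ post.reverse.flatten := by
  intro n
  induction n with
  | zero =>
    intro s hs cur l r pre post h
    have hsnil : s = [] := by
      cases s with
      | nil => rfl
      | cons a t => simp at hs
    subst hsnil
    simpa using aux_nil cur l r pre post
  | succ m ih =>
    intro s hs cur l r pre post h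
    cases s with
    | nil =>
      simpa using aux_nil cur l r pre post
    | cons c rest =>
      have hrest : rest.length ≤ m := by simp at hs; omega
      set l' := if c = '(' then l + 1 else l with hl'
      set r' := if c = '(' then r else r + 1 with hr'
      have hb' : l' - r' = balL (cur ++ [c]) := by
        rw [balL_snoc, hl', hr']
        split_ifs <;> omega
      rw [List.foldl_cons, stepB_eq]
      by_cases hz : balL (cur ++ [c]) = 0
      · have hlr : l' = r' := by omega
        have hG : G (c :: rest) cur l r
            = if isCorrectParenthesis (cur ++ [c]) then (cur ++ [c]) ++ goA rest
              else '(' :: (goA rest ++ ')' :: reverseParenthesis (PySem.List.slice (cur ++ [c]) (some 1) (some (-1)))) := by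
          simp only [G, sepLoop_cons, ← hl', ← hr', if_pos hlr]
        rw [if_pos hz]
        by_cases hcl : clampL (cur ++ [c]) = 0
        · have hic : isCorrectParenthesis (cur ++ [c]) = true := (isCorrect_iff _).mpr hcl
          rw [if_pos hcl]
          have h0 : balL ([] : List Char) = 0 := rfl
          have h0' : clampL ([] : List Char) = 0 := rfl
          have := ih rest hrest [] 0 0 (pre ++ [cur ++ [c]]) post (by simp [balL])
          rw [h0, h0'] at this
          rw [this, hG, if_pos hic, ← goA_eq_G]
          simp
        · have hic : isCorrectParenthesis (cur ++ [c]) ≠ true := by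
            intro hh; exact hcl ((isCorrect_iff _).mp hh)
          rw [if_neg hcl]
          have h0 : balL ([] : List Char) = 0 := rfl
          have h0' : clampL ([] : List Char) = 0 := rfl
          have := ih rest hrest [] 0 0 (pre ++ [['(']])
            (post ++ [')' :: (PySem.List.slice (cur ++ [c]) (some 1) (some (-1))).map pvFlip]) (by simp [balL])
          rw [h0, h0'] at this
          rw [this, hG, if_neg hic, ← goA_eq_G, revP_eq_map]
          simp
      · have hlr : l' ≠ r' := by omega
        have hG : G (c :: rest) cur l r = G rest (cur ++ [c]) l' r' := by
          simp only [G, sepLoop_cons, ← hl', ← hr', if_neg hlr]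
        rw [if_neg hz, hG]
        exact ih rest hrest (cur ++ [c]) l' r' pre post hb'

-- ===== VERDICT (by name: the statement is the Claim_ definition above) =====
theorem changeToCorrectParenthesis_spec : Claim_equal_changeToCorrectParenthesis := by
  intro s _
  unfold Spec_changeToCorrectParenthesis
  rw [alt_eq_assemble]
  have h0 : balL ([] : List Char) = 0 := rfl
  have h0' : clampL ([] : List Char) = 0 := rfl
  have := aux s.toList.length s.toList le_rfl [] 0 0 [] [] (by simp [balL])
  rw [h0, h0'] at this
  rw [changeToCorrectParenthesis, this, ← goA_eq_G]
  simp
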